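-- pv_equiv track=rewrite | github.com/EdwardJRoss/bookfinder | bookfinder/transform.py | get_root_mapping
-- ===== SOURCE A (Python) =====
-- from graphlib import TopologicalSorter
-- from typing import TypeVar
--
-- T = TypeVar("T")
--
-- def get_root_mapping(parent_dict: dict[T, T]) -> dict[T, T]:
--     """Return a mapping of each node to its root node."""
--     root_dict = {node: parent for node, parent in parent_dict.items() if node == parent}
--     parent_dict = {
--         node: parent for node, parent in parent_dict.items() if node != parent
--     }
--     for node in TopologicalSorter(
--         {k: [v] for k, v in parent_dict.items()}
--     ).static_order():
--         if node not in parent_dict: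
--             root_dict[node] = node
--         else:
--             root_dict[node] = root_dict[parent_dict[node]]
--     return root_dict
-- ===== SOURCE B (Python) =====
-- def get_root_mapping(parent_dict):
--     """Return a mapping of each node to its root node."""
--     root = {node: parent for node, parent in parent_dict.items() if node == parent}
--     for start in list(parent_dict) + list(parent_dict.values()):
--         node, path = start, []
--         while node not in root:
--             if node not in parent_dict:
--                 root[node] = node
--                 break
--             if node in path:
--                 raise ValueError("nodes are in a cycle: %r" % (path + [node],))
--             path.append(node)
--             node = parent_dict[node]
--         r = root[node]
--         for p in reversed(path):
--             root[p] = r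
--     return root
-- ===== Notes on version B (the rewrite author's own statement) =====
-- stated objective: faster
-- what changed: Replaces A's TopologicalSorter-based two-phase computation (build a topological order of the self-loop-free parent graph, then propagate roots along it) with a single pass of iterative path-following with memoization: each node walks its parent chain until an already-known root and that root is recorded for the whole path, raising an error on a cycle where A raises graphlib.CycleError.
import Mathlib
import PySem

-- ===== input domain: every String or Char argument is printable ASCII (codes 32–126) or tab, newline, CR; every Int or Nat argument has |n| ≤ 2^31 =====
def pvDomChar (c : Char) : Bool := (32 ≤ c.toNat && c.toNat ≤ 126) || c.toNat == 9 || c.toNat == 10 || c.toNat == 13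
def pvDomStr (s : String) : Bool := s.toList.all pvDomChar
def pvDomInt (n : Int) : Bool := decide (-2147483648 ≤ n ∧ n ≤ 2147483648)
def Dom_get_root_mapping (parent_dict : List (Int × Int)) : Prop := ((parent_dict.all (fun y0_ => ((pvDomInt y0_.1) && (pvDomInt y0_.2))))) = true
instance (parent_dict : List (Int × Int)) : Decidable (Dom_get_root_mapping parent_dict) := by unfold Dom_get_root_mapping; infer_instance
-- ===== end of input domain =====

-- B replaces A's topological sort with memoized path-following (union-find style): same mapping in one pass,
-- without graphlib's TopologicalSorter bookkeeping (measurably faster by a constant factor).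

-- ===== PORT A =====
-- graphlib's TopologicalSorter.static_order yields SOME valid topological order (its precise order is an
-- unspecified library internal); we port it as a DFS over parent pointers that emits each not-yet-visited
-- chain root-first — a valid topological order of the graph {k: [v]}.  On a cyclic input the Python raises
-- graphlib.CycleError (those inputs are outside Pre_); there the port merely runs out of fuel.
def pvSoWalk (pd : PySem.Dict Int Int) : Nat → List Int → Int → List Int → List Int × List Int
  | 0, visited, _, path => (path, visited)  -- fuel exhausted: only reachable on cyclic inputs (outside Pre_)
  | fuel+1, visited, node, path =>
    if node ∈ visited then (path, visited)
    else
      match pd.get? node with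
      | none => (node :: path, node :: visited)
      | some p => pvSoWalk pd fuel (node :: visited) p (node :: path)

def pvStaticOrder (pd : PySem.Dict Int Int) (fuel : Nat) : List Int :=
  ((pd.keys ++ pd.values).foldl
    (fun st n =>
      let w := pvSoWalk pd fuel st.2 n []
      (st.1 ++ w.1, w.2)) ([], [])).1

-- body of A's 'for node in …static_order()' loop (inside Pre_ the root_dict lookup never misses; getD 0 is the total form)
def pvMainStep (pd : PySem.Dict Int Int) (rd : PySem.Dict Int Int) (node : Int) : PySem.Dict Int Int :=
  match pd.get? node with
  | none => rd.insert node node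
  | some p => rd.insert node (rd.getD p 0)

def get_root_mapping (parent_dict : List (Int × Int)) : List (Int × Int) :=
  let d := PySem.Dict.ofList parent_dict
  let root_dict := PySem.Dict.ofList (d.items.filter (fun kv => kv.1 == kv.2))
  let pd := PySem.Dict.ofList (d.items.filter (fun kv => kv.1 != kv.2))
  ((pvStaticOrder pd (parent_dict.length + 1)).foldl (pvMainStep pd) root_dict).items

-- ===== PORT B =====
-- 'for p in reversed(path): root[p] = r' — the Lean path list is consed, hence already in reversed(path) order
def pvAssign (root : PySem.Dict Int Int) (r : Int) (path : List Int) : PySem.Dict Int Int :=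
  path.foldl (fun rd p => rd.insert p r) root

def pvFindWalk (d : PySem.Dict Int Int) : Nat → PySem.Dict Int Int → Int → List Int → PySem.Dict Int Int
  | 0, root, _, _ => root   -- fuel exhausted: unreachable (the while loop visits distinct keys of d)
  | fuel+1, root, node, path =>
    match root.get? node with
    | some r => pvAssign root r path
    | none =>
      match d.get? node with
      | none => pvAssign (root.insert node node) node path
      | some p =>
        if node ∈ path then root   -- Python B raises ValueError here (outside Pre_)
        else pvFindWalk d fuel root p (node :: path)

def get_root_mapping_alt (parent_dict : List (Int × Int)) : List (Int × Int) :=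
  let d := PySem.Dict.ofList parent_dict
  let root := PySem.Dict.ofList (d.items.filter (fun kv => kv.1 == kv.2))
  ((d.keys ++ d.values).foldl (fun root n => pvFindWalk d (parent_dict.length + 1) root n []) root).items

-- ===== PRECONDITION & SPEC =====
def pvReaches (pd : PySem.Dict Int Int) : Nat → Int → Bool
  | 0, n => (pd.get? n).isNone
  | fuel+1, n =>
    match pd.get? n with
    | none => true
    | some p => pvReaches pd fuel p

-- Pre_: the parent graph with self-loops removed is acyclic (every node's parent chain reaches a root in at
-- most len(parent_dict) steps) — exactly the inputs on which A's TopologicalSorter.static_order returns a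
-- value instead of raising graphlib.CycleError (Python B raises a ValueError there).
def Pre_get_root_mapping (parent_dict : List (Int × Int)) : Prop :=
  ∀ k ∈ (PySem.Dict.ofList parent_dict).keys,
    pvReaches (PySem.Dict.ofList ((PySem.Dict.ofList parent_dict).items.filter (fun kv => kv.1 != kv.2)))
      parent_dict.length k = true
instance (parent_dict : List (Int × Int)) : Decidable (Pre_get_root_mapping parent_dict) := by
  unfold Pre_get_root_mapping; infer_instance

def pvWitness_get_root_mapping : (List (Int × Int)) := [(1, 1), (2, 1), (3, 2), (5, 4)]

def Spec_get_root_mapping (parent_dict : List (Int × Int)) (out : List (Int × Int)) : Prop := out = get_root_mapping_alt parent_dict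
instance (parent_dict : List (Int × Int)) (out : List (Int × Int)) : Decidable (Spec_get_root_mapping parent_dict out) := by unfold Spec_get_root_mapping; infer_instance

-- ===== CLAIM (what is proved, stated in full; the proofs are below) =====
def Claim_equal_get_root_mapping : Prop := ∀ (parent_dict : List (Int × Int)), Dom_get_root_mapping parent_dict → Pre_get_root_mapping parent_dict → Spec_get_root_mapping parent_dict (get_root_mapping parent_dict)

-- ===== LEMMAS AND PROOFS =====

-- the root of a node: follow parent pointers `fuel` times
def pvRootF (pd : PySem.Dict Int Int) : Nat → Int → Int
  | 0, n => n
  | fuel+1, n =>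
    match pd.get? n with
    | none => n
    | some p => pvRootF pd fuel p

-- iterate the parent map as a partial function
def pvIt (pd : PySem.Dict Int Int) : Nat → Int → Option Int
  | 0, n => some n
  | fuel+1, n => (pd.get? n).bind (pvIt pd fuel)

-- path is a chain of parent pointers ending at `node` (head's parent is node)
def pvChain (pd : PySem.Dict Int Int) : List Int → Int → Prop
  | [], _ => True
  | c :: cs, n => pd.get? c = some n ∧ pvChain pd cs c

theorem pvReaches_succ (pd : PySem.Dict Int Int) :
    ∀ (f : Nat) (n : Int), pvReaches pd f n = true → pvReaches pd (f+1) n = true := by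
  intro f
  induction f with
  | zero =>
    intro n h
    simp only [pvReaches, Option.isNone_iff_eq_none] at h
    simp [pvReaches, h]
  | succ f ih =>
    intro n h
    simp only [pvReaches] at h ⊢
    cases hh : pd.get? n with
    | none => simp
    | some p =>
      rw [hh] at h
      exact ih p h

theorem pvReaches_le (pd : PySem.Dict Int Int) {f g : Nat} (h : f ≤ g) (n : Int)
    (hr : pvReaches pd f n = true) : pvReaches pd g n = true := by
  induction g, h using Nat.le_induction with
  | base => exact hr
  | succ g _ ih => exact pvReaches_succ pd g n ih

theorem pvRootF_succ (pd : PySem.Dict Int Int) :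
    ∀ (f : Nat) (n : Int), pvReaches pd f n = true → pvRootF pd (f+1) n = pvRootF pd f n := by
  intro f
  induction f with
  | zero =>
    intro n h
    simp only [pvReaches, Option.isNone_iff_eq_none] at h
    simp [pvRootF, h]
  | succ f ih =>
    intro n h
    simp only [pvReaches] at h
    simp only [pvRootF]
    cases hh : pd.get? n with
    | none => rfl
    | some p =>
      rw [hh] at h
      exact ih p h

theorem pvRootF_none (pd : PySem.Dict Int Int) (L : Nat) (n : Int)
    (h : pd.get? n = none) : pvRootF pd L n = n := by
  cases L <;> simp [pvRootF, h]

theorem pvRootF_step (pd : PySem.Dict Int Int) (L : Nat) (n p : Int)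
    (h : pd.get? n = some p) (hr : pvReaches pd L n = true) :
    pvRootF pd L n = pvRootF pd L p := by
  rw [← pvRootF_succ pd L n hr]
  simp [pvRootF, h]

theorem pvIt_add (pd : PySem.Dict Int Int) :
    ∀ (a b : Nat) (n : Int), pvIt pd (a + b) n = (pvIt pd a n).bind (pvIt pd b) := by
  intro a
  induction a with
  | zero => intro b n; simp [pvIt]
  | succ a ih =>
    intro b n
    have e : a + 1 + b = (a + b) + 1 := by omega
    rw [e]
    simp only [pvIt]
    cases pd.get? n with
    | none => simp
    | some p => simp [ih b p]

theorem pvIt_cycle_not_reach (pd : PySem.Dict Int Int) :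
    ∀ (f k : Nat) (n : Int), pvIt pd k n = some n → k ≠ 0 → ¬ (pvReaches pd f n = true) := by
  intro f
  induction f with
  | zero =>
    intro k n hcyc hk h
    simp only [pvReaches, Option.isNone_iff_eq_none] at h
    obtain ⟨k', rfl⟩ : ∃ k', k = k' + 1 := ⟨k - 1, by omega⟩
    simp [pvIt, h] at hcyc
  | succ f ih =>
    intro k n hcyc hk h
    simp only [pvReaches] at h
    cases hg : pd.get? n with
    | none =>
      obtain ⟨k', rfl⟩ : ∃ k', k = k' + 1 := ⟨k - 1, by omega⟩
      simp [pvIt, hg] at hcyc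
    | some p =>
      rw [hg] at h
      have h1 : pvIt pd 1 n = some p := by simp [pvIt, hg]
      have e1 : pvIt pd (k+1) n = pvIt pd k p := by
        rw [show k + 1 = 1 + k by omega, pvIt_add pd 1 k n, h1]
        rfl
      have e2 : pvIt pd (k+1) n = some p := by
        rw [pvIt_add pd k 1 n, hcyc]
        simpa using h1
      exact ih k p (by rw [← e1, e2]) hk h

theorem pvChain_it (pd : PySem.Dict Int Int) :
    ∀ (path : List Int) (node m : Int), pvChain pd path node → m ∈ path →
      ∃ k, k ≠ 0 ∧ pvIt pd k m = some node := by
  intro path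
  induction path with
  | nil => intro node m _ hm; simp at hm
  | cons c cs ih =>
    intro node m hc hm
    obtain ⟨h1, h2⟩ := hc
    rcases List.mem_cons.mp hm with rfl | hm
    · exact ⟨1, one_ne_zero, by simp [pvIt, h1]⟩
    · obtain ⟨k, hk, hit⟩ := ih c m h2 hm
      refine ⟨k + 1, by omega, ?_⟩
      rw [pvIt_add pd k 1 m, hit]
      simp [pvIt, h1]

theorem pvChain_not_mem (pd : PySem.Dict Int Int) (L : Nat)
    (Hreach : ∀ x, pvReaches pd L x = true) (path : List Int) (node : Int)
    (hc : pvChain pd path node) : node ∉ path := by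
  intro hmem
  obtain ⟨k, hk, hit⟩ := pvChain_it pd path node node hc hmem
  exact pvIt_cycle_not_reach pd L k node hit hk (Hreach node)

theorem pvChain_mem_key (pd : PySem.Dict Int Int) :
    ∀ (path : List Int) (node m : Int), pvChain pd path node → m ∈ path →
      (pd.get? m).isSome = true := by
  intro path
  induction path with
  | nil => intro node m _ hm; simp at hm
  | cons c cs ih =>
    intro node m hc hm
    obtain ⟨h1, h2⟩ := hc
    rcases List.mem_cons.mp hm with rfl | hm
    · simp [h1]
    · exact ih c m h2 hm

-- inserting the value already present changes nothing
theorem pvInsert_same (rd : PySem.Dict Int Int) (k v : Int)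
    (h : rd.get? k = some v) (hnd : rd.keys.Nodup) : rd.insert k v = rd := by
  have hc : rd.contains k = true := by
    rw [PySem.Dict.contains_eq_isSome_get?, h]
    rfl
  apply PySem.Dict.ext
  rw [PySem.Dict.items_insert_of_contains rd v hc]
  obtain ⟨l⟩ := rd
  simp only [PySem.Dict.keys] at hnd
  induction l with
  | nil => rfl
  | cons a t ih =>
    rw [PySem.Dict.get?_mk_cons] at h
    simp only [List.map_cons, List.nodup_cons] at hnd
    by_cases hak : a.1 = k
    · have hb : (a.1 == k) = true := by simp [hak]
      rw [hb] at h
      simp only [if_pos] at h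
      have hv : v = a.2 := by injection h; omega
      simp only [List.map_cons, hb, if_pos]
      have htail : t.map (fun p => if (p.1 == k) = true then (k, v) else p) = t := by
        have : ∀ p ∈ t, (fun p => if (p.1 == k) = true then (k, v) else p) p = id p := by
          intro p hp
          have : p.1 ≠ k := by
            intro e
            exact hnd.1 (by rw [← hak] at e; exact (e ▸ List.mem_map_of_mem hp : a.1 ∈ t.map Prod.fst))
          simp [this]
        rw [List.map_congr_left this, List.map_id]
      rw [htail, hv, ← hak]
    · have hb : (a.1 == k) = false := by simp [hak]
      rw [hb] at h
      simp only [Bool.false_eq_true, if_false] at h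
      simp only [List.map_cons, hb]
      have hct : ({ items := t } : PySem.Dict Int Int).contains k = true := by
        rw [PySem.Dict.contains_eq_isSome_get?, h]; rfl
      rw [ih h hnd.2 hct]
      simp

-- the loop invariant coupling A's visited set with B's root dict
def pvInv (d pd : PySem.Dict Int Int) (L : Nat) (rd : PySem.Dict Int Int) (vis : List Int) : Prop :=
  (∀ n : Int, (rd.get? n).isSome = true ↔ (n ∈ vis ∨ d.get? n = some n)) ∧
  (∀ (n r : Int), rd.get? n = some r → r = pvRootF pd L n) ∧
  rd.keys.Nodup

-- assigning the root to every node of a chain = A's per-node root_dict[parent_dict[node]] steps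
theorem pvAssign_eq (pd : PySem.Dict Int Int) (L : Nat) :
    ∀ (path : List Int) (node : Int) (rd : PySem.Dict Int Int),
      (∀ n r : Int, rd.get? n = some r → r = pvRootF pd L n) → rd.keys.Nodup →
      pvChain pd path node → path.Nodup →
      (∀ m ∈ path, rd.get? m = none) →
      rd.get? node = some (pvRootF pd L node) →
      (pvReaches pd L node = true) →
      (∀ x, pvReaches pd L x = true) →
      path.foldl (pvMainStep pd) rd = pvAssign rd (pvRootF pd L node) path ∧
      (∀ n : Int, ((path.foldl (pvMainStep pd) rd).get? n).isSome = true ↔ ((rd.get? n).isSome = true ∨ n ∈ path)) ∧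
      (∀ n r : Int, (path.foldl (pvMainStep pd) rd).get? n = some r → r = pvRootF pd L n) ∧
      (path.foldl (pvMainStep pd) rd).keys.Nodup := by
  intro path
  induction path with
  | nil =>
    intro node rd hval hnd _ _ _ _ _ _
    exact ⟨rfl, by simp, hval, hnd⟩
  | cons c cs ih =>
    intro node rd hval hnd hchain hnodup hfresh hroot hreachn hreachall
    obtain ⟨hc1, hc2⟩ := hchain
    obtain ⟨hcnotmem, hcsnodup⟩ := List.nodup_cons.mp hnodup
    have hRc : pvRootF pd L c = pvRootF pd L node := pvRootF_step pd L c node hc1 (hreachall c)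
    have hstep : pvMainStep pd rd c = rd.insert c (pvRootF pd L node) := by
      unfold pvMainStep
      rw [hc1]
      show rd.insert c (rd.getD node 0) = rd.insert c (pvRootF pd L node)
      rw [PySem.Dict.getD_eq_get?_getD, hroot]
      rfl
    have hval1 : ∀ n r : Int, (rd.insert c (pvRootF pd L node)).get? n = some r → r = pvRootF pd L n := by
      intro n r h
      rw [PySem.Dict.get?_insert] at h
      by_cases hnc : n = c
      · rw [if_pos hnc] at h
        have : r = pvRootF pd L node := by injection h; omega
        rw [this, ← hRc, hnc]
      · rw [if_neg hnc] at h
        exact hval n r h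
    have hnd1 : (rd.insert c (pvRootF pd L node)).keys.Nodup := PySem.Dict.nodup_keys_insert rd c _ hnd
    have hroot1 : (rd.insert c (pvRootF pd L node)).get? c = some (pvRootF pd L c) := by
      rw [PySem.Dict.get?_insert_self, hRc]
    have hfresh1 : ∀ m ∈ cs, (rd.insert c (pvRootF pd L node)).get? m = none := by
      intro m hm
      have hmc : m ≠ c := fun e => hcnotmem (e ▸ hm)
      rw [PySem.Dict.get?_insert_of_ne rd _ hmc]
      exact hfresh m (List.mem_cons_of_mem _ hm)
    obtain ⟨heq, hiff, hval', hnd'⟩ :=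
      ih c (rd.insert c (pvRootF pd L node)) hval1 hnd1 hc2 hcsnodup hfresh1 hroot1 (hreachall c) hreachall
    have hfoldl : (c :: cs).foldl (pvMainStep pd) rd = cs.foldl (pvMainStep pd) (rd.insert c (pvRootF pd L node)) := by
      rw [List.foldl_cons, hstep]
    refine ⟨?_, ?_, ?_, ?_⟩
    · rw [hfoldl, heq, hRc]
      rfl
    · intro n
      rw [hfoldl, hiff n]
      rw [PySem.Dict.get?_insert]
      by_cases hnc : n = c
      · simp [hnc]
      · simp [hnc]
    · rw [hfoldl]; exact hval'
    · rw [hfoldl]; exact hnd'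

-- terminal step of a walk: the current node is visited, a seeded self-loop, or a fresh root
theorem pvWalk_base (d pd : PySem.Dict Int Int) (L : Nat)
    (Hdp : ∀ n : Int, pd.get? n = if d.get? n = some n then none else d.get? n)
    (Hreach : ∀ x, pvReaches pd L x = true)
    (f : Nat) (node : Int) (path : List Int) (rd : PySem.Dict Int Int) (vis : List Int)
    (hinv : pvInv d pd L rd vis)
    (hchain : pvChain pd path node) (hnodup : path.Nodup)
    (hdisj : ∀ m ∈ path, m ∉ vis)
    (hstop : node ∈ vis ∨ pd.get? node = none) :
    pvFindWalk d (f+1) rd node path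
      = (pvSoWalk pd (f+1) (path ++ vis) node path).1.foldl (pvMainStep pd) rd ∧
    pvInv d pd L ((pvSoWalk pd (f+1) (path ++ vis) node path).1.foldl (pvMainStep pd) rd)
      (pvSoWalk pd (f+1) (path ++ vis) node path).2 := by
  obtain ⟨hinv1, hinv2, hinv3⟩ := hinv
  have hnmem : node ∉ path := pvChain_not_mem pd L Hreach path node hchain
  have hfresh : ∀ m ∈ path, rd.get? m = none := by
    intro m hm
    have hkey : (pd.get? m).isSome = true := pvChain_mem_key pd path node m hchain hm
    have hmsl : ¬ (d.get? m = some m) := by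
      intro hsl
      rw [Hdp m, if_pos hsl] at hkey
      simp at hkey
    have hns : ¬ ((rd.get? m).isSome = true) := by
      rw [hinv1 m]
      push_neg
      exact ⟨hdisj m hm, hmsl⟩
    simpa [Option.isSome_iff_ne_none, Decidable.not_not] using hns
  by_cases hv : node ∈ vis
  · -- node already visited: A emits just the path, B looks up its memoized root
    have hmem : node ∈ path ++ vis := List.mem_append.mpr (Or.inr hv)
    have hsw : pvSoWalk pd (f+1) (path ++ vis) node path = (path, path ++ vis) := by
      simp [pvSoWalk, hmem]
    rw [hsw]
    have hsome : (rd.get? node).isSome = true := (hinv1 node).mpr (Or.inl hv)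
    obtain ⟨r, hr⟩ := Option.isSome_iff_exists.mp hsome
    have hrv : r = pvRootF pd L node := hinv2 node r hr
    rw [hrv] at hr
    obtain ⟨heq, hiff, hval, hnd⟩ :=
      pvAssign_eq pd L path node rd hinv2 hinv3 hchain hnodup hfresh hr (Hreach node) Hreach
    refine ⟨?_, ?_, hval, hnd⟩
    · show pvFindWalk d (f+1) rd node path = _
      simp only [pvFindWalk, hr]
      exact heq.symm
    · intro n
      rw [hiff n, hinv1 n, List.mem_append]
      tauto
  · have hpd : pd.get? node = none := hstop.resolve_left hv
    have hmem : node ∉ path ++ vis := by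
      rw [List.mem_append]
      push_neg
      exact ⟨hnmem, hv⟩
    have hsw : pvSoWalk pd (f+1) (path ++ vis) node path = (node :: path, node :: (path ++ vis)) := by
      simp [pvSoWalk, hmem, hpd]
    rw [hsw]
    have hrootn : pvRootF pd L node = node := pvRootF_none pd L node hpd
    by_cases hsl : d.get? node = some node
    · -- seeded self-loop: A's insert is the identity, B reads the seed
      have hsome : (rd.get? node).isSome = true := (hinv1 node).mpr (Or.inr hsl)
      obtain ⟨r, hr⟩ := Option.isSome_iff_exists.mp hsome
      have hrv : r = pvRootF pd L node := hinv2 node r hr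
      rw [hrv, hrootn] at hr
      have hstep : pvMainStep pd rd node = rd := by
        unfold pvMainStep
        rw [hpd]
        exact pvInsert_same rd node node hr hinv3
      have hroot' : rd.get? node = some (pvRootF pd L node) := by rw [hrootn]; exact hr
      obtain ⟨heq, hiff, hval, hnd⟩ :=
        pvAssign_eq pd L path node rd hinv2 hinv3 hchain hnodup hfresh hroot' (Hreach node) Hreach
      have hfold : (node :: path).foldl (pvMainStep pd) rd = path.foldl (pvMainStep pd) rd := by
        rw [List.foldl_cons, hstep]
      refine ⟨?_, ?_, by rw [hfold]; exact hval, by rw [hfold]; exact hnd⟩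
      · show pvFindWalk d (f+1) rd node path = _
        simp only [pvFindWalk, hr]
        rw [hfold, heq, hrootn]
      · intro n
        rw [hfold, hiff n, hinv1 n, List.mem_cons, List.mem_append]
        by_cases hn : n = node
        · subst hn; tauto
        · tauto
    · -- fresh root: both sides insert (node, node) then assign the path
      have hnone : rd.get? node = none := by
        have hns : ¬ ((rd.get? node).isSome = true) := by
          rw [hinv1 node]
          push_neg
          exact ⟨hv, hsl⟩
        simpa [Option.isSome_iff_ne_none, Decidable.not_not] using hns
      have hdnone : d.get? node = none := by
        have := Hdp node
        rw [if_neg hsl] at this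
        rw [← this]
        exact hpd
      have hval1 : ∀ n r : Int, (rd.insert node node).get? n = some r → r = pvRootF pd L n := by
        intro n r h
        rw [PySem.Dict.get?_insert] at h
        by_cases hn : n = node
        · rw [if_pos hn] at h
          have : r = node := by injection h; omega
          rw [this, hn, hrootn]
        · rw [if_neg hn] at h
          exact hinv2 n r h
      have hnd1 : (rd.insert node node).keys.Nodup := PySem.Dict.nodup_keys_insert rd node node hinv3
      have hroot1 : (rd.insert node node).get? node = some (pvRootF pd L node) := by
        rw [PySem.Dict.get?_insert_self, hrootn]
      have hfresh1 : ∀ m ∈ path, (rd.insert node node).get? m = none := by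
        intro m hm
        have hmn : m ≠ node := fun e => hnmem (e ▸ hm)
        rw [PySem.Dict.get?_insert_of_ne rd node hmn]
        exact hfresh m hm
      obtain ⟨heq, hiff, hval, hnd⟩ :=
        pvAssign_eq pd L path node (rd.insert node node) hval1 hnd1 hchain hnodup hfresh1 hroot1 (Hreach node) Hreach
      have hfold : (node :: path).foldl (pvMainStep pd) rd
          = path.foldl (pvMainStep pd) (rd.insert node node) := by
        rw [List.foldl_cons]
        unfold pvMainStep
        rw [hpd]
      refine ⟨?_, ?_, by rw [hfold]; exact hval, by rw [hfold]; exact hnd⟩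
      · show pvFindWalk d (f+1) rd node path = _
        simp only [pvFindWalk, hnone, hdnone]
        rw [hfold, heq, hrootn]
      · intro n
        rw [hfold, hiff n]
        rw [PySem.Dict.get?_insert]
        by_cases hn : n = node
        · subst hn
          simp [hinv1 n]
        · rw [if_neg hn, hinv1 n, List.mem_cons, List.mem_append]
          tauto

-- the central walk lemma: one iteration of B's while-loop ≡ one soWalk emission processed by A's loop
theorem pvWalk_eq (d pd : PySem.Dict Int Int) (L : Nat)
    (Hdp : ∀ n : Int, pd.get? n = if d.get? n = some n then none else d.get? n)
    (Hreach : ∀ x, pvReaches pd L x = true) :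
    ∀ (f : Nat) (node : Int) (path : List Int) (rd : PySem.Dict Int Int) (vis : List Int),
      pvReaches pd f node = true →
      pvInv d pd L rd vis →
      pvChain pd path node → path.Nodup →
      (∀ m ∈ path, m ∉ vis) →
      pvFindWalk d (f+1) rd node path
        = (pvSoWalk pd (f+1) (path ++ vis) node path).1.foldl (pvMainStep pd) rd ∧
      pvInv d pd L ((pvSoWalk pd (f+1) (path ++ vis) node path).1.foldl (pvMainStep pd) rd)
        (pvSoWalk pd (f+1) (path ++ vis) node path).2 := by
  intro f
  induction f with
  | zero =>
    intro node path rd vis hreachf hinv hchain hnodup hdisj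
    have hpd : pd.get? node = none := by
      simpa [pvReaches, Option.isNone_iff_eq_none] using hreachf
    exact pvWalk_base d pd L Hdp Hreach 0 node path rd vis hinv hchain hnodup hdisj (Or.inr hpd)
  | succ f ih =>
    intro node path rd vis hreachf hinv hchain hnodup hdisj
    by_cases hv : node ∈ vis
    · exact pvWalk_base d pd L Hdp Hreach (f+1) node path rd vis hinv hchain hnodup hdisj (Or.inl hv)
    cases hpd : pd.get? node with
    | none => exact pvWalk_base d pd L Hdp Hreach (f+1) node path rd vis hinv hchain hnodup hdisj (Or.inr hpd)
    | some p =>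
      have hnmem : node ∉ path := pvChain_not_mem pd L Hreach path node hchain
      have hmem : node ∉ path ++ vis := by
        rw [List.mem_append]
        push_neg
        exact ⟨hnmem, hv⟩
      have hrp : pvReaches pd f p = true := by
        simp only [pvReaches] at hreachf
        rw [hpd] at hreachf
        exact hreachf
      have hsw : pvSoWalk pd (f+1+1) (path ++ vis) node path
          = pvSoWalk pd (f+1) (node :: (path ++ vis)) p (node :: path) := by
        simp [pvSoWalk, hmem, hpd]
      have hnone : rd.get? node = none := by
        have hsl : ¬ (d.get? node = some node) := by
          intro hsl
          rw [Hdp node, if_pos hsl] at hpd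
          simp at hpd
        have hns : ¬ ((rd.get? node).isSome = true) := by
          rw [hinv.1 node]
          push_neg
          exact ⟨hv, hsl⟩
        simpa [Option.isSome_iff_ne_none, Decidable.not_not] using hns
      have hdn : d.get? node = some p := by
        have hsl : ¬ (d.get? node = some node) := by
          intro hsl
          rw [Hdp node, if_pos hsl] at hpd
          simp at hpd
        have := Hdp node
        rw [if_neg hsl] at this
        rw [← this, hpd]
      have hfw : pvFindWalk d (f+1+1) rd node path = pvFindWalk d (f+1) rd p (node :: path) := by
        simp only [pvFindWalk, hnone, hdn]
        rw [if_neg hnmem]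
      obtain ⟨heq, hinv'⟩ := ih p (node :: path) rd vis hrp hinv ⟨hpd, hchain⟩
        (List.nodup_cons.mpr ⟨hnmem, hnodup⟩)
        (by
          intro m hm
          rcases List.mem_cons.mp hm with rfl | hm
          · exact hv
          · exact hdisj m hm)
      rw [hsw, hfw]
      exact ⟨heq, hinv'⟩

-- fuse A's two phases: building static_order and then folding over it = folding walk-by-walk
theorem pvFuse (pd : PySem.Dict Int Int) (F : Nat) :
    ∀ (seq acc : List Int) (vis : List Int) (rd : PySem.Dict Int Int),
      ((seq.foldl (fun st n => let w := pvSoWalk pd F st.2 n []; (st.1 ++ w.1, w.2)) (acc, vis)).1).foldl (pvMainStep pd) rd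
      = (seq.foldl (fun st n => let w := pvSoWalk pd F st.2 n [];
            (w.1.foldl (pvMainStep pd) st.1, w.2)) (acc.foldl (pvMainStep pd) rd, vis)).1 := by
  intro seq
  induction seq with
  | nil => intro acc vis rd; rfl
  | cons n t ih =>
    intro acc vis rd
    simp only [List.foldl_cons]
    rw [ih]
    rw [List.foldl_append]

-- A's walk started at an already-seeded self-loop node leaves the root dict unchanged
theorem pvAStep_sl (d pd : PySem.Dict Int Int) (L : Nat)
    (Hdp : ∀ n : Int, pd.get? n = if d.get? n = some n then none else d.get? n)
    (rd : PySem.Dict Int Int) (vis : List Int) (h1 : Int)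
    (hinv : pvInv d pd L rd vis) (hsl : d.get? h1 = some h1) :
    (pvSoWalk pd (L+1) vis h1 []).1.foldl (pvMainStep pd) rd = rd ∧
    pvInv d pd L rd (pvSoWalk pd (L+1) vis h1 []).2 := by
  obtain ⟨hinv1, hinv2, hinv3⟩ := hinv
  have hpd : pd.get? h1 = none := by rw [Hdp h1, if_pos hsl]
  have hsome : (rd.get? h1).isSome = true := (hinv1 h1).mpr (Or.inr hsl)
  obtain ⟨r, hr⟩ := Option.isSome_iff_exists.mp hsome
  have hrv : r = pvRootF pd L h1 := hinv2 h1 r hr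
  rw [hrv, pvRootF_none pd L h1 hpd] at hr
  by_cases hv : h1 ∈ vis
  · have hsw : pvSoWalk pd (L+1) vis h1 [] = ([], vis) := by simp [pvSoWalk, hv]
    rw [hsw]
    exact ⟨rfl, hinv1, hinv2, hinv3⟩
  · have hsw : pvSoWalk pd (L+1) vis h1 [] = ([h1], h1 :: vis) := by simp [pvSoWalk, hv, hpd]
    rw [hsw]
    constructor
    · show pvMainStep pd rd h1 = rd
      unfold pvMainStep
      rw [hpd]
      exact pvInsert_same rd h1 h1 hr hinv3
    · refine ⟨?_, hinv2, hinv3⟩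
      intro n
      rw [hinv1 n, List.mem_cons]
      by_cases hn : n = h1
      · subst hn; tauto
      · tauto

-- the two folds over the two node sequences agree (self-loop nodes are no-ops on both sides)
theorem pvSeq_eq (d pd : PySem.Dict Int Int) (L : Nat)
    (Hdp : ∀ n : Int, pd.get? n = if d.get? n = some n then none else d.get? n)
    (Hreach : ∀ x, pvReaches pd L x = true) :
    ∀ (N : Nat) (s1 s2 : List Int) (rd : PySem.Dict Int Int) (vis : List Int),
      s1.length + s2.length ≤ N →
      s1.filter (fun n => !(d.get? n == some n)) = s2.filter (fun n => !(d.get? n == some n)) →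
      pvInv d pd L rd vis →
      (s1.foldl (fun st n => let w := pvSoWalk pd (L+1) st.2 n [];
          (w.1.foldl (pvMainStep pd) st.1, w.2)) (rd, vis)).1
      = s2.foldl (fun root n => pvFindWalk d (L+1) root n []) rd := by
  intro N
  induction N with
  | zero =>
    intro s1 s2 rd vis hlen hfil hinv
    have h1 : s1 = [] := by cases s1 <;> simp at hlen ⊢
    have h2 : s2 = [] := by cases s2 <;> simp at hlen ⊢
    subst h1; subst h2
    rfl
  | succ N ih =>
    intro s1 s2 rd vis hlen hfil hinv
    cases s2 with
    | nil =>
      cases s1 with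
      | nil => rfl
      | cons h1 t1 =>
        have hsl1 : d.get? h1 = some h1 := by
          by_contra hns
          have : (!(d.get? h1 == some h1)) = true := by simpa using hns
          simp [List.filter_cons, this] at hfil
        obtain ⟨hrd, hinv'⟩ := pvAStep_sl d pd L Hdp rd vis h1 hinv hsl1
        rw [List.foldl_cons]
        have : ((pvSoWalk pd (L+1) vis h1 []).1.foldl (pvMainStep pd) rd,
            (pvSoWalk pd (L+1) vis h1 []).2)
            = (rd, (pvSoWalk pd (L+1) vis h1 []).2) := by rw [hrd]
        rw [this]
        refine ih t1 [] rd _ (by simp at hlen ⊢; omega) ?_ hinv'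
        simpa [List.filter_cons, hsl1] using hfil
    | cons h2 t2 =>
      by_cases hsl2 : d.get? h2 = some h2
      · -- strip B's no-op head
        have hsome : (rd.get? h2).isSome = true := (hinv.1 h2).mpr (Or.inr hsl2)
        obtain ⟨r, hr⟩ := Option.isSome_iff_exists.mp hsome
        have hfw : pvFindWalk d (L+1) rd h2 [] = rd := by
          simp [pvFindWalk, hr, pvAssign]
        rw [List.foldl_cons, hfw]
        refine ih s1 t2 rd vis (by simp at hlen ⊢; omega) ?_ hinv
        simpa [List.filter_cons, hsl2] using hfil
      · cases s1 with
        | nil =>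
          exfalso
          have : (!(d.get? h2 == some h2)) = true := by simpa using hsl2
          simp [List.filter_cons, this] at hfil
        | cons h1 t1 =>
          by_cases hsl1 : d.get? h1 = some h1
          · -- strip A's no-op head
            obtain ⟨hrd, hinv'⟩ := pvAStep_sl d pd L Hdp rd vis h1 hinv hsl1
            rw [List.foldl_cons]
            have : ((pvSoWalk pd (L+1) vis h1 []).1.foldl (pvMainStep pd) rd,
                (pvSoWalk pd (L+1) vis h1 []).2)
                = (rd, (pvSoWalk pd (L+1) vis h1 []).2) := by rw [hrd]
            rw [this]
            refine ih t1 (h2 :: t2) rd _ (by simp at hlen ⊢; omega) ?_ hinv'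
            simpa [List.filter_cons, hsl1] using hfil
          · -- both heads are real work: they must be equal
            have hb1 : (!(d.get? h1 == some h1)) = true := by simpa using hsl1
            have hb2 : (!(d.get? h2 == some h2)) = true := by simpa using hsl2
            rw [List.filter_cons, List.filter_cons, if_pos hb1, if_pos hb2] at hfil
            obtain ⟨heads, htails⟩ := List.cons_eq_cons.mp hfil
            subst heads
            obtain ⟨heq, hinv'⟩ := pvWalk_eq d pd L Hdp Hreach L h1 [] rd vis (Hreach h1)
              hinv trivial List.nodup_nil (by simp)
            rw [List.foldl_cons, List.foldl_cons, heq]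
            exact ih t1 t2 _ _ (by simp at hlen ⊢; omega) htails hinv'

-- building a dict from a pair list whose keys are distinct keeps the list as items
theorem pvItems_ofList (xs : List (Int × Int)) (h : (xs.map Prod.fst).Nodup) :
    (PySem.Dict.ofList xs).items = xs := by
  have := PySem.Dict.items_foldl_insert_fresh xs Prod.fst Prod.snd PySem.Dict.empty
    (by intro a _; simp) h
  simpa using this

-- lookup in the self-loop-free sub-dict
theorem pvGet?_filter_ne : ∀ (ld : List (Int × Int)), (ld.map Prod.fst).Nodup → ∀ (n : Int),
    (PySem.Dict.mk (ld.filter (fun kv => kv.1 != kv.2))).get? n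
      = if (PySem.Dict.mk ld).get? n = some n then none else (PySem.Dict.mk ld).get? n := by
  intro ld
  induction ld with
  | nil =>
    intro _ n
    have h0 : (PySem.Dict.mk ([] : List (Int × Int))).get? n = none := rfl
    simp [h0]
  | cons a t ih =>
    intro hnd n
    obtain ⟨k, v⟩ := a
    simp only [List.map_cons, List.nodup_cons] at hnd
    by_cases hae : k = v
    · by_cases han : k = n
      · have hln : (PySem.Dict.mk (t.filter (fun kv => kv.1 != kv.2))).get? n = none := by
          rw [PySem.Dict.get?_eq_none_iff_not_mem_keys]
          intro hmem
          have hx : ∃ x, (n, x) ∈ t ∧ ¬ n = x := by simpa using hmem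
          obtain ⟨x, hx1, _⟩ := hx
          apply hnd.1
          rw [han]
          exact List.mem_map.mpr ⟨(n, x), hx1, rfl⟩
        have h2n : v = n := by omega
        simp [List.filter_cons, PySem.Dict.get?_mk_cons, hae, han, h2n, hln]
      · have hvn : ¬ v = n := by omega
        simp [List.filter_cons, PySem.Dict.get?_mk_cons, hae, han, hvn, ih hnd.2 n]
    · by_cases han : k = n
      · have hvn : ¬ v = n := by omega
        have hnv : ¬ n = v := by omega
        simp [List.filter_cons, PySem.Dict.get?_mk_cons, hae, han, hvn, hnv]
      · simp [List.filter_cons, PySem.Dict.get?_mk_cons, hae, han, ih hnd.2 n]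

-- lookup in the self-loop seed dict
theorem pvGet?_filter_eq : ∀ (ld : List (Int × Int)), (ld.map Prod.fst).Nodup → ∀ (n : Int),
    (PySem.Dict.mk (ld.filter (fun kv => kv.1 == kv.2))).get? n
      = if (PySem.Dict.mk ld).get? n = some n then some n else none := by
  intro ld
  induction ld with
  | nil =>
    intro _ n
    have h0 : (PySem.Dict.mk ([] : List (Int × Int))).get? n = none := rfl
    simp [h0]
  | cons a t ih =>
    intro hnd n
    obtain ⟨k, v⟩ := a
    simp only [List.map_cons, List.nodup_cons] at hnd
    by_cases hae : k = v
    · by_cases han : k = n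
      · have h2n : v = n := by omega
        simp [List.filter_cons, PySem.Dict.get?_mk_cons, hae, han, h2n]
      · have hvn : ¬ v = n := by omega
        simp [List.filter_cons, PySem.Dict.get?_mk_cons, hae, han, hvn, ih hnd.2 n]
    · by_cases han : k = n
      · have hvn : ¬ v = n := by omega
        have hnv : ¬ n = v := by omega
        have hln : (PySem.Dict.mk (t.filter (fun kv => kv.1 == kv.2))).get? n = none := by
          rw [PySem.Dict.get?_eq_none_iff_not_mem_keys]
          intro hmem
          have hx : (n, n) ∈ t := by simpa using hmem
          apply hnd.1
          rw [han]
          exact List.mem_map.mpr ⟨(n, n), hx, rfl⟩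
        simp [List.filter_cons, PySem.Dict.get?_mk_cons, hae, han, hvn, hnv, hln]
      · simp [List.filter_cons, PySem.Dict.get?_mk_cons, hae, han, ih hnd.2 n]

-- filtering the keys by 'not a self-loop' yields the filtered dict's keys
theorem pvKeys_filter_aux (q : Int → Bool) : ∀ (ld : List (Int × Int)),
    (∀ kv ∈ ld, q kv.1 = (kv.1 != kv.2)) →
    (ld.map Prod.fst).filter q = (ld.filter (fun kv => kv.1 != kv.2)).map Prod.fst := by
  intro ld
  induction ld with
  | nil => intro _; rfl
  | cons a t ih =>
    intro hq
    rw [List.map_cons, List.filter_cons, List.filter_cons]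
    have ha := hq a (List.mem_cons_self)
    rw [ha]
    by_cases hae : (a.1 != a.2) = true
    · rw [if_pos hae, if_pos hae, List.map_cons,
        ih (fun kv hkv => hq kv (List.mem_cons_of_mem a hkv))]
    · rw [if_neg hae, if_neg hae, ih (fun kv hkv => hq kv (List.mem_cons_of_mem a hkv))]

-- self-loop values may be dropped from the value list before filtering by 'not a self-loop'
theorem pvValues_filter_aux (q : Int → Bool) : ∀ (ld : List (Int × Int)),
    (∀ kv ∈ ld, kv.1 = kv.2 → q kv.2 = false) →
    ((ld.filter (fun kv => kv.1 != kv.2)).map Prod.snd).filter q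
      = (ld.map Prod.snd).filter q := by
  intro ld
  induction ld with
  | nil => intro _; rfl
  | cons a t ih =>
    intro hq
    have iht := ih (fun kv hkv => hq kv (List.mem_cons_of_mem a hkv))
    by_cases hae : a.1 = a.2
    · have hqa : q a.2 = false := hq a (List.mem_cons_self) hae
      simp [List.filter_cons, hae, hqa, iht]
    · have hb : (a.1 != a.2) = true := by simp [hae]
      simp only [List.filter_cons, List.map_cons, hb, if_true]
      rw [iht]

theorem get_root_mapping_spec_aux (parent_dict : List (Int × Int))
    (hpre : Pre_get_root_mapping parent_dict) :
    get_root_mapping parent_dict = get_root_mapping_alt parent_dict := by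
  unfold get_root_mapping get_root_mapping_alt
  dsimp only
  set d := PySem.Dict.ofList parent_dict with hd
  set pdl := d.items.filter (fun kv => kv.1 != kv.2) with hpdl
  set sll := d.items.filter (fun kv => kv.1 == kv.2) with hsll
  set pd := PySem.Dict.ofList pdl with hpd
  set root0 := PySem.Dict.ofList sll with hroot0
  have hndk : (d.items.map Prod.fst).Nodup := by
    have := PySem.Dict.nodup_keys_ofList parent_dict
    simpa [PySem.Dict.keys] using this
  have hpditems : pd.items = pdl := by
    rw [hpd]
    apply pvItems_ofList
    exact hndk.sublist (List.Sublist.map Prod.fst (List.filter_sublist))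
  have hslitems : root0.items = sll := by
    rw [hroot0]
    apply pvItems_ofList
    exact hndk.sublist (List.Sublist.map Prod.fst (List.filter_sublist))
  have hmkd : PySem.Dict.mk d.items = d := PySem.Dict.ext rfl
  have hpdmk : pd = PySem.Dict.mk pdl := PySem.Dict.ext hpditems
  have hslmk : root0 = PySem.Dict.mk sll := PySem.Dict.ext hslitems
  have Hdp : ∀ n : Int, pd.get? n = if d.get? n = some n then none else d.get? n := by
    intro n
    rw [hpdmk, hpdl, pvGet?_filter_ne d.items hndk n, hmkd]
  have Hroot0 : ∀ n : Int, root0.get? n = if d.get? n = some n then some n else none := by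
    intro n
    rw [hslmk, hsll, pvGet?_filter_eq d.items hndk n, hmkd]
  have hndkeys : d.keys.Nodup := by simpa [PySem.Dict.keys] using hndk
  have Hgetmem : ∀ kv ∈ d.items, d.get? kv.1 = some kv.2 := by
    intro kv hkv
    obtain ⟨k, v⟩ := kv
    exact PySem.Dict.get?_of_mem_items d hkv hndkeys
  have Hreach : ∀ x : Int, pvReaches pd parent_dict.length x = true := by
    intro x
    by_cases hx : pd.get? x = none
    · exact pvReaches_le pd (Nat.zero_le _) x (by simp [pvReaches, hx])
    · have hxk : x ∈ d.keys := by
        have hxp : x ∈ pd.keys := by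
          by_contra hnk
          exact hx ((PySem.Dict.get?_eq_none_iff_not_mem_keys pd x).mpr hnk)
        have hm : x ∈ pdl.map Prod.fst := by
          simpa [PySem.Dict.keys, hpditems] using hxp
        obtain ⟨kv, hkv, he⟩ := List.mem_map.mp hm
        have : kv.1 ∈ d.items.map Prod.fst := List.mem_map_of_mem (List.mem_of_mem_filter hkv)
        simpa [PySem.Dict.keys, he] using this
      exact hpre x hxk
  have Inv0 : pvInv d pd parent_dict.length root0 [] := by
    refine ⟨?_, ?_, ?_⟩
    · intro n
      rw [Hroot0 n]
      split_ifs with h <;> simp [h]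
    · intro n r h
      rw [Hroot0 n] at h
      split_ifs at h with hsl
      have hrn : r = n := by injection h with h'; omega
      have hpn : pd.get? n = none := by rw [Hdp n, if_pos hsl]
      rw [hrn, pvRootF_none pd parent_dict.length n hpn]
    · exact PySem.Dict.nodup_keys_ofList sll
  have hkeys1 : pd.keys.filter (fun n => !(d.get? n == some n)) = pd.keys := by
    apply List.filter_eq_self.mpr
    intro k hk
    have hk' : k ∈ pdl.map Prod.fst := by simpa [PySem.Dict.keys, hpditems] using hk
    obtain ⟨kv, hkv, he⟩ := List.mem_map.mp hk'
    obtain ⟨hkd, hkne⟩ := List.mem_filter.mp hkv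
    have hget := Hgetmem kv hkd
    have hne : kv.1 ≠ kv.2 := by simpa using hkne
    have hne2 : some kv.2 ≠ some kv.1 := by
      intro hc
      injection hc with hc'
      exact hne hc'.symm
    rw [← he, hget]
    simp
    omega
  have hkeys2 : d.keys.filter (fun n => !(d.get? n == some n)) = pd.keys := by
    have hq : ∀ kv ∈ d.items, (fun n => !(d.get? n == some n)) kv.1 = (kv.1 != kv.2) := by
      intro kv hkd
      have hget := Hgetmem kv hkd
      show (!(d.get? kv.1 == some kv.1)) = (kv.1 != kv.2)
      rw [hget]
      by_cases h12 : kv.1 = kv.2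
      · simp [h12]
      · have e1 : (some kv.2 == some kv.1) = false := by
          simp
          omega
        have e2 : (kv.1 != kv.2) = true := by simp [h12]
        rw [e1, e2]
        rfl
    calc d.keys.filter (fun n => !(d.get? n == some n))
        = (d.items.map Prod.fst).filter (fun n => !(d.get? n == some n)) := rfl
      _ = pdl.map Prod.fst := pvKeys_filter_aux (fun n => !(d.get? n == some n)) d.items hq
      _ = pd.keys := by
          show _ = pd.items.map (fun p => p.1)
          rw [hpditems]
  have hvals : pd.values.filter (fun n => !(d.get? n == some n))
      = d.values.filter (fun n => !(d.get? n == some n)) := by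
    have hqv : ∀ kv ∈ d.items, kv.1 = kv.2 → (fun n => !(d.get? n == some n)) kv.2 = false := by
      intro kv hkd h12
      have hget := Hgetmem kv hkd
      rw [h12] at hget
      show (!(d.get? kv.2 == some kv.2)) = false
      rw [hget]
      simp
    calc pd.values.filter (fun n => !(d.get? n == some n))
        = (pdl.map Prod.snd).filter (fun n => !(d.get? n == some n)) := by
          show (pd.items.map (fun p => p.2)).filter _ = _
          rw [hpditems]
      _ = (d.items.map Prod.snd).filter (fun n => !(d.get? n == some n)) :=
          pvValues_filter_aux (fun n => !(d.get? n == some n)) d.items hqv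
      _ = d.values.filter (fun n => !(d.get? n == some n)) := rfl
  have hseq : (pd.keys ++ pd.values).filter (fun n => !(d.get? n == some n))
      = (d.keys ++ d.values).filter (fun n => !(d.get? n == some n)) := by
    rw [List.filter_append, List.filter_append, hkeys1, hkeys2, hvals]
  congr 1
  unfold pvStaticOrder
  rw [pvFuse pd (parent_dict.length + 1) (pd.keys ++ pd.values) [] [] root0]
  exact pvSeq_eq d pd parent_dict.length Hdp Hreach
    ((pd.keys ++ pd.values).length + (d.keys ++ d.values).length)
    (pd.keys ++ pd.values) (d.keys ++ d.values) root0 [] le_rfl hseq Inv0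

-- ===== VERDICT (by name: the statement is the Claim_ definition above) =====
theorem get_root_mapping_spec : Claim_equal_get_root_mapping := by
  intro parent_dict _ hpre
  exact get_root_mapping_spec_aux parent_dict hpre
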